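-- pv_equiv track=rewrite | github.com/JStrazecki/PBIMcpWebAPP | pbi_mcp_finance/utils/enhanced_logging.py | _categorize_log_message
-- ===== SOURCE A (Python) =====
-- def _categorize_log_message(message: str) -> str:
--     """Categorize log message for analysis"""
--     message_lower = message.lower()
--
--     if any(term in message_lower for term in ['auth', 'login', 'token', 'credential']):
--         return 'authentication'
--     elif any(term in message_lower for term in ['database', 'sql', 'query', 'connection']):
--         return 'database'
--     elif any(term in message_lower for term in ['api', 'http', 'request', 'response']):
--         return 'api'
--     elif any(term in message_lower for term in ['powerbi', 'dax', 'measure', 'dataset']):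
--         return 'powerbi'
--     elif any(term in message_lower for term in ['cache', 'context', 'build']):
--         return 'caching'
--     elif any(term in message_lower for term in ['error', 'exception', 'failed', 'failure']):
--         return 'error'
--     elif any(term in message_lower for term in ['performance', 'slow', 'timeout']):
--         return 'performance'
--     else:
--         return 'general'
-- ===== SOURCE B (Python) =====
-- # Inverted index approach: a flat term->category dict replaces the per-category
-- # if/elif chain; stage 1 collects the set of ALL matched categories, stage 2
-- # picks the highest-priority one from a fixed priority list.
-- _TERM_CATEGORY = {
--     'auth': 'authentication', 'login': 'authentication',
--     'token': 'authentication', 'credential': 'authentication',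
--     'database': 'database', 'sql': 'database',
--     'query': 'database', 'connection': 'database',
--     'api': 'api', 'http': 'api', 'request': 'api', 'response': 'api',
--     'powerbi': 'powerbi', 'dax': 'powerbi',
--     'measure': 'powerbi', 'dataset': 'powerbi',
--     'cache': 'caching', 'context': 'caching', 'build': 'caching',
--     'error': 'error', 'exception': 'error',
--     'failed': 'error', 'failure': 'error',
--     'performance': 'performance', 'slow': 'performance',
--     'timeout': 'performance',
-- }
--
-- _PRIORITY = ['authentication', 'database', 'api', 'powerbi',
--              'caching', 'error', 'performance']
--
--
-- def _categorize_log_message(message: str) -> str: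
--     """Categorize log message for analysis"""
--     message_lower = message.lower()
--     matched = {cat for term, cat in _TERM_CATEGORY.items()
--                if term in message_lower}
--     for cat in _PRIORITY:
--         if cat in matched:
--             return cat
--     return 'general'
-- ===== Notes on version B (the rewrite author's own statement) =====
-- stated objective: alternative
-- what changed: Inverts the category->terms branches into a flat term->category dict, eagerly collects the set of all matched categories in one comprehension, then selects the highest-priority matched category from a fixed priority list (two staged passes instead of A's short-circuiting if/elif chain).
import Mathlib
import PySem

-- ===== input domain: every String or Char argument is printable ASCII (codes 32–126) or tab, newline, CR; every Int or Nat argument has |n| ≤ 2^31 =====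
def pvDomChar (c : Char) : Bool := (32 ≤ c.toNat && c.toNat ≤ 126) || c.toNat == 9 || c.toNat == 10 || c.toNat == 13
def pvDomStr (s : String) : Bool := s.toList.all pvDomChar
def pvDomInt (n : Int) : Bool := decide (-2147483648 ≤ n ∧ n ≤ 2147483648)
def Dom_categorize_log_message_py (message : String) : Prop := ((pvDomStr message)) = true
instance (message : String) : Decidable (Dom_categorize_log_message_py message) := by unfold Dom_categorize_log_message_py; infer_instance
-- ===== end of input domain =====

-- B inverts A's if/elif chain into a flat term->category map: it collects the set of all
-- matched categories, then picks the highest-priority one; same return value, objective: alternative.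
-- ===== PORT A =====
def categorize_log_message_py (message : String) : String :=
  let message_lower := PySem.Str.lower message
  if ["auth", "login", "token", "credential"].any (fun term => PySem.Str.isIn term message_lower) then
    "authentication"
  else if ["database", "sql", "query", "connection"].any (fun term => PySem.Str.isIn term message_lower) then
    "database"
  else if ["api", "http", "request", "response"].any (fun term => PySem.Str.isIn term message_lower) then
    "api"
  else if ["powerbi", "dax", "measure", "dataset"].any (fun term => PySem.Str.isIn term message_lower) then
    "powerbi"
  else if ["cache", "context", "build"].any (fun term => PySem.Str.isIn term message_lower) then
    "caching"
  else if ["error", "exception", "failed", "failure"].any (fun term => PySem.Str.isIn term message_lower) then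
    "error"
  else if ["performance", "slow", "timeout"].any (fun term => PySem.Str.isIn term message_lower) then
    "performance"
  else
    "general"

-- ===== PORT B =====
-- the term -> category dict, as its items() list (insertion order)
def pvTermCategory : List (String × String) :=
  [("auth", "authentication"), ("login", "authentication"),
   ("token", "authentication"), ("credential", "authentication"),
   ("database", "database"), ("sql", "database"),
   ("query", "database"), ("connection", "database"),
   ("api", "api"), ("http", "api"), ("request", "api"), ("response", "api"),
   ("powerbi", "powerbi"), ("dax", "powerbi"),
   ("measure", "powerbi"), ("dataset", "powerbi"),
   ("cache", "caching"), ("context", "caching"), ("build", "caching"),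
   ("error", "error"), ("exception", "error"),
   ("failed", "error"), ("failure", "error"),
   ("performance", "performance"), ("slow", "performance"),
   ("timeout", "performance")]

def pvPriority : List String :=
  ["authentication", "database", "api", "powerbi", "caching", "error", "performance"]

-- the set comprehension: set of categories whose term occurs in message_lower
def pvMatched (message_lower : String) : PySem.Set String :=
  PySem.Set.ofList
    ((pvTermCategory.filter (fun p => PySem.Str.isIn p.1 message_lower)).map Prod.snd)

-- the for-loop over the priority list: first category in the matched set, else "general"
def pvPick (prio : List String) (matched : PySem.Set String) : String :=
  match prio with
  | [] => "general"
  | c :: rest => if PySem.Set.contains matched c then c else pvPick rest matched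

def categorize_log_message_py_alt (message : String) : String :=
  let message_lower := PySem.Str.lower message
  pvPick pvPriority (pvMatched message_lower)

-- ===== PRECONDITION & SPEC =====
def Spec_categorize_log_message_py (message : String) (out : String) : Prop := out = categorize_log_message_py_alt message
instance (message : String) (out : String) : Decidable (Spec_categorize_log_message_py message out) := by unfold Spec_categorize_log_message_py; infer_instance

-- ===== CLAIM (what is proved, stated in full; the proofs are below) =====
def Claim_equal_categorize_log_message_py : Prop := ∀ (message : String), Dom_categorize_log_message_py message → Spec_categorize_log_message_py message (categorize_log_message_py message)

-- ===== LEMMAS AND PROOFS =====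

-- each category is in the matched set exactly when one of its own terms occurs
theorem pvContains_authentication (ml : String) :
    PySem.Set.contains (pvMatched ml) "authentication" =
      (PySem.Str.isIn "auth" ml ||
       PySem.Str.isIn "login" ml ||
       PySem.Str.isIn "token" ml ||
       PySem.Str.isIn "credential" ml) := by
  simp [pvMatched, PySem.Set.contains, PySem.Set.mem_ofList, List.mem_filter,
    pvTermCategory, Bool.or_assoc]

theorem pvContains_database (ml : String) :
    PySem.Set.contains (pvMatched ml) "database" =
      (PySem.Str.isIn "database" ml ||
       PySem.Str.isIn "sql" ml ||
       PySem.Str.isIn "query" ml ||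
       PySem.Str.isIn "connection" ml) := by
  simp [pvMatched, PySem.Set.contains, PySem.Set.mem_ofList, List.mem_filter,
    pvTermCategory, Bool.or_assoc]

theorem pvContains_api (ml : String) :
    PySem.Set.contains (pvMatched ml) "api" =
      (PySem.Str.isIn "api" ml ||
       PySem.Str.isIn "http" ml ||
       PySem.Str.isIn "request" ml ||
       PySem.Str.isIn "response" ml) := by
  simp [pvMatched, PySem.Set.contains, PySem.Set.mem_ofList, List.mem_filter,
    pvTermCategory, Bool.or_assoc]

theorem pvContains_powerbi (ml : String) :
    PySem.Set.contains (pvMatched ml) "powerbi" =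
      (PySem.Str.isIn "powerbi" ml ||
       PySem.Str.isIn "dax" ml ||
       PySem.Str.isIn "measure" ml ||
       PySem.Str.isIn "dataset" ml) := by
  simp [pvMatched, PySem.Set.contains, PySem.Set.mem_ofList, List.mem_filter,
    pvTermCategory, Bool.or_assoc]

theorem pvContains_caching (ml : String) :
    PySem.Set.contains (pvMatched ml) "caching" =
      (PySem.Str.isIn "cache" ml ||
       PySem.Str.isIn "context" ml ||
       PySem.Str.isIn "build" ml) := by
  simp [pvMatched, PySem.Set.contains, PySem.Set.mem_ofList, List.mem_filter,
    pvTermCategory, Bool.or_assoc]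

theorem pvContains_error (ml : String) :
    PySem.Set.contains (pvMatched ml) "error" =
      (PySem.Str.isIn "error" ml ||
       PySem.Str.isIn "exception" ml ||
       PySem.Str.isIn "failed" ml ||
       PySem.Str.isIn "failure" ml) := by
  simp [pvMatched, PySem.Set.contains, PySem.Set.mem_ofList, List.mem_filter,
    pvTermCategory, Bool.or_assoc]

theorem pvContains_performance (ml : String) :
    PySem.Set.contains (pvMatched ml) "performance" =
      (PySem.Str.isIn "performance" ml ||
       PySem.Str.isIn "slow" ml ||
       PySem.Str.isIn "timeout" ml) := by
  simp [pvMatched, PySem.Set.contains, PySem.Set.mem_ofList, List.mem_filter,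
    pvTermCategory, Bool.or_assoc]

-- ===== VERDICT (by name: the statement is the Claim_ definition above) =====
theorem categorize_log_message_py_spec : Claim_equal_categorize_log_message_py := by
  intro message _
  unfold Spec_categorize_log_message_py categorize_log_message_py categorize_log_message_py_alt
  simp only [pvPriority, pvPick, pvContains_authentication, pvContains_database,
    pvContains_api, pvContains_powerbi, pvContains_caching, pvContains_error,
    pvContains_performance, List.any_cons, List.any_nil, Bool.or_false, Bool.or_assoc]
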